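-- pv_equiv track=rewrite | github.com/RobinBruneau/Project_Euler | tools.py | power2
-- ===== SOURCE A (Python) =====
-- def add(l1,l2):
--     lf = []
--     total = max(len(l1),len(l2))
--     diff = len(l1)-len(l2)
--     if diff > 0 :
--         l2 = l2 + diff*[0]
--     else :
--         l1 = l1 + (-diff)*[0]
--
--     reste = 0
--     for k in range(total):
--         val = l1[k]+l2[k]+reste
--         if val >=10 :
--             reste = val//10
--             div = val%10
--         else :
--             div = val
--             reste = 0
--
--         lf.append(div)
--     if reste != 0:
--         lf.append(reste)
--     return lf
--
-- def power2(a,b):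
--
--     l1 = [1]
--     l2 = []
--     for e in str(a):
--         l2.append(int(e))
--     l2.reverse()
--
--     for k in range(b):
--         l1 = product(l1,l2)
--         a=0
--     return l1
--
-- def product(l1,l2):
--
--     def product_fast(L,n):
--         Lf = [0]*len(L)
--         reste = 0
--         for k, e in enumerate(L):
--             v = str(n * e + reste)
--             if len(v) == 1:
--                 Lf[k] = int(v)
--                 reste = 0
--             else:
--                 reste = int(v[:-1])
--                 Lf[k] = int(v[-1])
--             a = 0
--         reste = str(reste)
--         if reste != "0":
--             for m in range(len(reste)):
--                 Lf.append(int(reste[-1 - m]))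
--         return Lf
--
--     prod = []
--     for k,e in enumerate(l2) :
--         sL = k*[0] + product_fast(l1,e)
--         prod = add(prod,sL)
--
--     return prod
-- ===== SOURCE B (Python) =====
-- def power2(a, b):
--     # Native bignum exponentiation, then emit the decimal digits little-endian.
--     return [int(c) for c in str(a ** b)][::-1]
-- ===== Notes on version B (the rewrite author's own statement) =====
-- stated objective: faster
-- what changed: A builds a^b by b rounds of hand-written decimal schoolbook multiplication over digit lists (with string conversions inside the inner loop); B computes a**b once with native integer exponentiation and emits its decimal digits little-endian.
-- outside the precondition, e.g. on power2(2, -1): A returns [1], B raises ValueError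
import Mathlib
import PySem

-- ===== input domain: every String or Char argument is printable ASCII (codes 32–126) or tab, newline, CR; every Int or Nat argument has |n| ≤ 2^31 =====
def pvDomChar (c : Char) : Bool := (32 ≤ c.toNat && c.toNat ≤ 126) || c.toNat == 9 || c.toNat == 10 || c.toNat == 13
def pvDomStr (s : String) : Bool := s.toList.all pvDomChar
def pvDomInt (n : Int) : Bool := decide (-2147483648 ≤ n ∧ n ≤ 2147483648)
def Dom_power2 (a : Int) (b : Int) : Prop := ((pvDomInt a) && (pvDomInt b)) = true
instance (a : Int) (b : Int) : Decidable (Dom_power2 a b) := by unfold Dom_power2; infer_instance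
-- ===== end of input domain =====

-- B computes a^b with native exponentiation and converts to little-endian decimal digits once;
-- A multiplies digit lists b times with schoolbook decimal arithmetic.

-- ===== PORT A =====

-- int(e) for a one-character string e (the `.getD 0` branch is unreachable on digit characters)
def chInt (c : Char) : Int := (PySem.Int.ofChars? [c]).getD 0
-- int(s) for a string given as its character list
def strInt (cs : List Char) : Int := (PySem.Int.ofChars? cs).getD 0

-- the `for k in range(total)` loop of `add`: both lists already padded to equal length
def addLoop : List Int → List Int → Int → List Int
  | x :: xs, y :: ys, reste =>
      let val := x + y + reste
      if val ≥ 10 then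
        PySem.Int.mod val 10 :: addLoop xs ys (PySem.Int.floordiv val 10)
      else
        val :: addLoop xs ys 0
  | _, _, reste => if reste ≠ 0 then [reste] else []

def addL (l1 l2 : List Int) : List Int :=
  let diff : Int := PySem.List.len l1 - PySem.List.len l2
  let l1' := if diff > 0 then l1 else l1 ++ List.replicate (-diff).toNat (0 : Int)
  let l2' := if diff > 0 then l2 ++ List.replicate diff.toNat (0 : Int) else l2
  addLoop l1' l2' 0

-- the `for k, e in enumerate(L)` loop of `product_fast`; returns (Lf, final reste).
-- v[:-1] is ported as List.dropLast and v[-1] as List.getLastD (exact: v = str(int) is never empty).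
def pfLoop : List Int → Int → Int → List Int × Int
  | [], _, reste => ([], reste)
  | e :: L, n, reste =>
      let v := PySem.Int.toChars (n * e + reste)
      if v.length = 1 then
        let rest := pfLoop L n 0
        (strInt v :: rest.1, rest.2)
      else
        let rest := pfLoop L n (strInt v.dropLast)
        (strInt [v.getLastD '0'] :: rest.1, rest.2)

def productFast (L : List Int) (n : Int) : List Int :=
  let r := pfLoop L n 0
  let resteS := PySem.Int.toChars r.2
  if resteS ≠ ['0'] then
    r.1 ++ (List.range resteS.length).map (fun (m : Nat) => strInt [PySem.List.pyGetD resteS (-1 - (m : Int)) '0'])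
  else r.1

-- the `for k, e in enumerate(l2)` loop of `product`
def prodLoop (l1 : List Int) : List Int → Nat → List Int → List Int
  | [], _, prod => prod
  | e :: rest, k, prod =>
      prodLoop l1 rest (k + 1) (addL prod (List.replicate k (0 : Int) ++ productFast l1 e))

def productL (l1 l2 : List Int) : List Int := prodLoop l1 l2 0 []

def power2 (a : Int) (b : Int) : List Int :=
  let l2 := ((PySem.Int.toChars a).map chInt).reverse
  (PySem.List.pyRange 0 b 1).foldl (fun l1 _ => productL l1 l2) [1]

-- ===== PORT B =====

def power2_alt (a : Int) (b : Int) : List Int :=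
  ((PySem.Int.toChars (a ^ b.toNat)).map chInt).reverse

-- ===== PRECONDITION & SPEC =====
-- Pre_ excludes a < 0 (A raises ValueError on int('-')) and b < 0 (A's empty range(b)
-- accidentally returns [1] there, while B's a**b is a float and int('.') raises ValueError).
def Pre_power2 (a : Int) (b : Int) : Prop := 0 ≤ a ∧ 0 ≤ b
instance (a : Int) (b : Int) : Decidable (Pre_power2 a b) := by unfold Pre_power2; infer_instance
def pvWitness_power2 : Int × Int := (3, 4)

def Spec_power2 (a : Int) (b : Int) (out : List Int) : Prop := out = power2_alt a b
instance (a : Int) (b : Int) (out : List Int) : Decidable (Spec_power2 a b out) := by unfold Spec_power2; infer_instance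

-- ===== CLAIM (what is proved, stated in full; the proofs are below) =====
def Claim_equal_power2 : Prop := ∀ (a : Int) (b : Int), Dom_power2 a b → Pre_power2 a b → Spec_power2 a b (power2 a b)

-- ===== LEMMAS AND PROOFS =====

-- the list of the L low decimal digits of n, little-endian
def pvRep (n : Int) (L : Nat) : List Int := (List.range L).map (fun i => n / 10 ^ i % 10)
-- the canonical little-endian digit list (empty for n <= 0)
def pvCan (n : Int) : List Int := (Nat.digits 10 n.toNat).map (fun d : Nat => (d : Int))
-- canonical digits, with [0] for value 0 (what str() produces)
def pvCanZ (n : Int) : List Int := if n.toNat = 0 then [0] else pvCan n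
def pvD (n : Int) : Nat := (Nat.digits 10 n.toNat).length
-- value of a little-endian digit list
def pvVal (l : List Int) : Int := l.foldr (fun d acc => d + 10 * acc) 0

lemma pymod10 (v : Int) : PySem.Int.mod v 10 = v % 10 :=
  PySem.Int.mod_eq_emod_of_pos (by norm_num)

lemma pydiv10 (v : Int) : PySem.Int.floordiv v 10 = v / 10 :=
  PySem.Int.floordiv_eq_ediv_of_pos (by norm_num)

lemma pvRep_succ (n : Int) (L : Nat) : pvRep n (L + 1) = n % 10 :: pvRep (n / 10) L := by
  unfold pvRep
  rw [List.range_succ_eq_map, List.map_cons, List.map_map]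
  congr 1
  · simp
  · apply List.map_congr_left
    intro i _
    simp only [Function.comp_apply]
    rw [Int.ediv_ediv_eq_ediv_mul (by norm_num : (0:Int) ≤ 10), ← pow_succ']

lemma pvRep_append_last (n : Int) (L : Nat) :
    pvRep n (L + 1) = pvRep n L ++ [n / 10 ^ L % 10] := by
  unfold pvRep
  rw [List.range_succ, List.map_append, List.map_cons]
  rfl

lemma pvRep_pad (n : Int) (L M : Nat) (h0 : 0 ≤ n) (h : n < 10 ^ L) (hLM : L ≤ M) :
    pvRep n M = pvRep n L ++ List.replicate (M - L) 0 := by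
  induction M, hLM using Nat.le_induction with
  | base => simp
  | succ M hLM ih =>
    have h10 : n < 10 ^ M := lt_of_lt_of_le h (pow_le_pow_right₀ (by norm_num) hLM)
    have hz : n / 10 ^ M = 0 := Int.ediv_eq_zero_of_lt h0 h10
    rw [pvRep_append_last, ih, hz]
    have hc : M + 1 - L = (M - L) + 1 := by omega
    rw [hc, List.replicate_succ', ← List.append_assoc]
    norm_num

lemma pvShift (y : Int) (k M : Nat) :
    List.replicate k (0 : Int) ++ pvRep y M = pvRep (10 ^ k * y) (k + M) := by
  induction k with
  | zero => simp
  | succ k ih =>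
    have h1 : (10 : Int) ^ (k + 1) * y = 10 * (10 ^ k * y) := by ring
    rw [h1, show k + 1 + M = (k + M) + 1 from by omega, pvRep_succ,
      Int.mul_emod_right, Int.mul_ediv_cancel_left _ (by norm_num : (10:Int) ≠ 0),
      List.replicate_succ, List.cons_append, ih]

lemma pvCan_rep (m : Nat) :
    (Nat.digits 10 m).map (fun d : Nat => (d : Int))
      = pvRep (m : Int) (Nat.digits 10 m).length := by
  induction m using Nat.strong_induction_on with
  | _ m ih =>
    rcases Nat.eq_zero_or_pos m with h | h
    · subst h; simp [pvRep]
    · rw [Nat.digits_def' (by norm_num : 1 < 10) h]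
      simp only [List.map_cons, List.length_cons]
      rw [pvRep_succ, ih (m / 10) (Nat.div_lt_self h (by norm_num))]
      have h1 : ((m % 10 : Nat) : Int) = (m : Int) % 10 := by omega
      have h2 : ((m / 10 : Nat) : Int) = (m : Int) / 10 := by omega
      rw [h1, h2]

lemma pvCan_eq (n : Int) (h : 0 ≤ n) : pvCan n = pvRep n (pvD n) := by
  unfold pvCan pvD
  rw [pvCan_rep, Int.toNat_of_nonneg h]

lemma pvD_spec (n : Int) (h : 1 ≤ n) :
    1 ≤ pvD n ∧ (10 : Int) ^ (pvD n - 1) ≤ n ∧ n < 10 ^ pvD n := by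
  have hm : n.toNat ≠ 0 := by omega
  have hDl : pvD n = (Nat.digits 10 n.toNat).length := rfl
  have hne : Nat.digits 10 n.toNat ≠ [] := Nat.digits_ne_nil_iff_ne_zero.mpr hm
  have hlen0 : 0 < (Nat.digits 10 n.toNat).length := List.length_pos_of_ne_nil hne
  have hlen : 1 ≤ pvD n := by omega
  have hup : n.toNat < 10 ^ pvD n :=
    (Nat.digits_length_le_iff (by norm_num) n.toNat).mp (by omega)
  have hlo : 10 ^ (pvD n - 1) ≤ n.toNat :=
    (Nat.lt_digits_length_iff (by norm_num) n.toNat).mp (by omega)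
  refine ⟨hlen, ?_, ?_⟩
  · calc (10 : Int) ^ (pvD n - 1) = ((10 ^ (pvD n - 1) : Nat) : Int) := by push_cast; ring
    _ ≤ (n.toNat : Int) := by exact_mod_cast hlo
    _ = n := Int.toNat_of_nonneg (by omega)
  · calc n = (n.toNat : Int) := (Int.toNat_of_nonneg (by omega)).symm
    _ < ((10 ^ pvD n : Nat) : Int) := by exact_mod_cast hup
    _ = (10 : Int) ^ pvD n := by push_cast; ring

lemma pvD_eq (n : Int) (P : Nat) (h1 : 1 ≤ P) (h2 : (10 : Int) ^ (P - 1) ≤ n) (h3 : n < 10 ^ P) :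
    pvD n = P := by
  have hn1 : 1 ≤ n := le_trans (one_le_pow₀ (by norm_num)) h2
  obtain ⟨hD1, hDlo, hDhi⟩ := pvD_spec n hn1
  by_contra hne
  rcases Nat.lt_or_ge (pvD n) P with hlt | hge
  · have : (10 : Int) ^ pvD n ≤ 10 ^ (P - 1) := pow_le_pow_right₀ (by norm_num) (by omega)
    omega
  · have hgt : P < pvD n := by omega
    have : (10 : Int) ^ P ≤ 10 ^ (pvD n - 1) := pow_le_pow_right₀ (by norm_num) (by omega)
    omega

lemma pvVal_map_cast (ds : List Nat) :
    pvVal (ds.map (fun d : Nat => (d : Int))) = ((Nat.ofDigits 10 ds : Nat) : Int) := by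
  induction ds with
  | nil => simp [pvVal, Nat.ofDigits_nil]
  | cons d ds ih =>
    simp only [List.map_cons, pvVal, List.foldr_cons] at *
    rw [ih, Nat.ofDigits_cons]
    push_cast
    ring

lemma pvVal_can (m : Nat) :
    pvVal ((Nat.digits 10 m).map (fun d : Nat => (d : Int))) = (m : Int) := by
  rw [pvVal_map_cast, Nat.ofDigits_digits]

lemma toDigitsCore_eq : ∀ (fuel m : Nat) (ds : List Char), 0 < m → m ≤ fuel →
    Nat.toDigitsCore 10 fuel m ds = ((Nat.digits 10 m).map Nat.digitChar).reverse ++ ds := by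
  intro fuel
  induction fuel with
  | zero => intro m ds h hle; omega
  | succ fuel ih =>
    intro m ds hm hle
    rw [Nat.toDigitsCore]
    by_cases h : m / 10 = 0
    · simp only [h, if_pos]
      rw [Nat.digits_def' (by norm_num : 1 < 10) hm, h, Nat.digits_zero]
      simp
    · simp only [h, if_false]
      have hdiv : m / 10 < m := Nat.div_lt_self hm (by norm_num)
      rw [ih (m / 10) _ (Nat.pos_of_ne_zero h) (by omega)]
      rw [Nat.digits_def' (by norm_num : 1 < 10) hm]
      simp [List.append_assoc]

lemma toChars_natCast (m : Nat) :
    PySem.Int.toChars (m : Int) =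
      if m = 0 then ['0'] else ((Nat.digits 10 m).map Nat.digitChar).reverse := by
  by_cases h : m = 0
  · subst h; rfl
  · rw [if_neg h]
    have hneg : ¬ ((m : Int) < 0) := by omega
    simp only [PySem.Int.toChars, hneg, if_false, Int.toNat_natCast]
    unfold Nat.toDigits
    rw [toDigitsCore_eq (m + 1) m [] (Nat.pos_of_ne_zero h) (by omega)]
    simp

lemma strInt_digitChar (d : Nat) (h : d < 10) : strInt [Nat.digitChar d] = (d : Int) := by
  revert h
  revert d
  decide

lemma chInt_digitChar (d : Nat) (h : d < 10) : chInt (Nat.digitChar d) = (d : Int) :=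
  strInt_digitChar d h

lemma digitChar_ne_zero (d : Nat) (h1 : 1 ≤ d) (h : d < 10) :
    [Nat.digitChar d] ≠ ['0'] := by
  revert h; revert h1; revert d; decide

lemma map_chInt_toChars (m : Nat) :
    ((PySem.Int.toChars (m : Int)).map chInt).reverse = pvCanZ (m : Int) := by
  rw [toChars_natCast]
  by_cases h : m = 0
  · subst h; decide
  · rw [if_neg h]
    unfold pvCanZ
    rw [if_neg (by simpa using h)]
    unfold pvCan
    rw [Int.toNat_natCast, List.map_reverse, List.map_map, List.reverse_reverse]
    apply List.map_congr_left
    intro d hd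
    exact chInt_digitChar d (Nat.digits_lt_base (by norm_num) hd)

lemma toChars_small (w : Int) (h0 : 0 ≤ w) (h : w < 10) :
    PySem.Int.toChars w = [Nat.digitChar w.toNat] := by
  rw [show w = ((w.toNat : Nat) : Int) from (Int.toNat_of_nonneg h0).symm, toChars_natCast,
    Int.toNat_natCast]
  by_cases hz : w.toNat = 0
  · rw [if_pos hz, hz]; rfl
  · rw [if_neg hz, Nat.digits_def' (by norm_num : 1 < 10) (Nat.pos_of_ne_zero hz)]
    have hd : w.toNat / 10 = 0 := by omega
    rw [hd, Nat.digits_zero]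
    have hm : w.toNat % 10 = w.toNat := by omega
    simp [hm]

lemma toChars_two (w : Int) (h0 : 10 ≤ w) (h : w < 100) :
    PySem.Int.toChars w = [Nat.digitChar (w.toNat / 10), Nat.digitChar (w.toNat % 10)] := by
  rw [show w = ((w.toNat : Nat) : Int) from (Int.toNat_of_nonneg (by omega)).symm, toChars_natCast,
    Int.toNat_natCast]
  have hz : w.toNat ≠ 0 := by omega
  rw [if_neg hz, Nat.digits_def' (by norm_num : 1 < 10) (by omega)]
  have h2 : 0 < w.toNat / 10 := by omega
  rw [Nat.digits_def' (by norm_num : 1 < 10) h2]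
  have hd : w.toNat / 10 / 10 = 0 := by omega
  rw [hd, Nat.digits_zero]
  have hm : w.toNat / 10 % 10 = w.toNat / 10 := by omega
  simp [hm]

lemma addLoop_rep : ∀ (L : Nat) (s t r : Int), 0 ≤ s → s < 10 ^ L → 0 ≤ t → t < 10 ^ L →
    0 ≤ r → r ≤ 1 →
    addLoop (pvRep s L) (pvRep t L) r
      = pvRep (s + t + r) (if s + t + r < 10 ^ L then L else L + 1) := by
  intro L
  induction L with
  | zero =>
    intro s t r hs0 hs ht0 ht hr0 hr1
    rw [pow_zero] at hs ht ⊢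
    have hs' : s = 0 := by omega
    have ht' : t = 0 := by omega
    subst hs'; subst ht'
    by_cases h : r = 0
    · subst h; simp [addLoop, pvRep]
    · have hr : r = 1 := by omega
      subst hr
      simp [addLoop, pvRep, List.range_succ]
  | succ L ih =>
    intro s t r hs0 hs ht0 ht hr0 hr1
    have hP : (0 : Int) < 10 ^ L := pow_pos (by norm_num) L
    have hpow : (10 : Int) ^ (L + 1) = 10 * 10 ^ L := by ring
    rw [hpow] at hs ht
    rw [pvRep_succ s, pvRep_succ t]
    have step : addLoop (s % 10 :: pvRep (s / 10) L) (t % 10 :: pvRep (t / 10) L) r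
        = (s % 10 + t % 10 + r) % 10
          :: addLoop (pvRep (s / 10) L) (pvRep (t / 10) L) ((s % 10 + t % 10 + r) / 10) := by
      simp only [addLoop, pymod10, pydiv10]
      split_ifs with hge
      · rfl
      · have h1 : (s % 10 + t % 10 + r) % 10 = s % 10 + t % 10 + r := by omega
        have h2 : (s % 10 + t % 10 + r) / 10 = 0 := by omega
        rw [h1, h2]
    rw [step, ih (s / 10) (t / 10) ((s % 10 + t % 10 + r) / 10)
      (by omega) (by omega) (by omega) (by omega) (by omega) (by omega)]
    have harg : s / 10 + t / 10 + (s % 10 + t % 10 + r) / 10 = (s + t + r) / 10 := by omega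
    rw [harg]
    have hhead : (s % 10 + t % 10 + r) % 10 = (s + t + r) % 10 := by omega
    have hdiv10 : s + t + r < 10 ^ (L + 1) ↔ (s + t + r) / 10 < 10 ^ L := by
      rw [hpow]; omega
    by_cases hc : s + t + r < 10 ^ (L + 1)
    · rw [if_pos (hdiv10.mp hc), if_pos hc, pvRep_succ, hhead]
    · rw [if_neg (fun hlt => hc (hdiv10.mpr hlt)), if_neg hc, hhead,
        pvRep_succ (s + t + r) (L + 1)]

lemma pvRep_len (n : Int) (L : Nat) : PySem.List.len (pvRep n L) = (L : Int) := by
  simp [PySem.List.len_eq, pvRep]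

lemma addL_rep (s t : Int) (Lp Lq : Nat) (hs0 : 0 ≤ s) (hs : s < 10 ^ Lp)
    (ht0 : 0 ≤ t) (ht : t < 10 ^ Lq) :
    addL (pvRep s Lp) (pvRep t Lq)
      = pvRep (s + t) (if s + t < 10 ^ max Lp Lq then max Lp Lq else max Lp Lq + 1) := by
  unfold addL
  dsimp only
  rw [pvRep_len, pvRep_len]
  rcases Nat.lt_or_ge Lq Lp with h | h
  · have hdiff : ((Lp : Int) - (Lq : Int) > 0) := by omega
    rw [if_pos hdiff, if_pos hdiff]
    have hTN : ((Lp : Int) - (Lq : Int)).toNat = Lp - Lq := by omega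
    rw [hTN, ← pvRep_pad t Lq Lp ht0 ht (by omega)]
    have ht' : t < 10 ^ Lp := lt_of_lt_of_le ht (pow_le_pow_right₀ (by norm_num) (by omega))
    rw [addLoop_rep Lp s t 0 hs0 hs ht0 ht' (le_refl 0) (by norm_num)]
    rw [max_eq_left (by omega)]
    norm_num
  · have hdiff : ¬ ((Lp : Int) - (Lq : Int) > 0) := by omega
    rw [if_neg hdiff, if_neg hdiff]
    have hTN : (-((Lp : Int) - (Lq : Int))).toNat = Lq - Lp := by omega
    rw [hTN, ← pvRep_pad s Lp Lq hs0 hs h]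
    have hs' : s < 10 ^ Lq := lt_of_lt_of_le hs (pow_le_pow_right₀ (by norm_num) h)
    rw [addLoop_rep Lq s t 0 hs0 hs' ht0 ht (le_refl 0) (by norm_num)]
    rw [max_eq_right h]
    norm_num

lemma pfLoop_rep : ∀ (L : Nat) (x n r : Int), 0 ≤ x → x < 10 ^ L → 0 ≤ n → n ≤ 9 →
    0 ≤ r → r ≤ 8 →
    pfLoop (pvRep x L) n r = (pvRep (n * x + r) L, (n * x + r) / 10 ^ L) := by
  intro L
  induction L with
  | zero =>
    intro x n r hx0 hxL hn0 hn9 hr0 hr8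
    rw [pow_zero] at hxL ⊢
    have hx : x = 0 := by omega
    subst hx
    simp [pfLoop, pvRep]
  | succ L ih =>
    intro x n r hx0 hxL hn0 hn9 hr0 hr8
    have hP : (0 : Int) < 10 ^ L := pow_pos (by norm_num) L
    have hpow : (10 : Int) ^ (L + 1) = 10 * 10 ^ L := by ring
    rw [hpow] at hxL
    have hm0 : 0 ≤ x % 10 := by omega
    have hm9 : x % 10 ≤ 9 := by omega
    have hw0 : 0 ≤ n * (x % 10) + r := by positivity
    have hw89 : n * (x % 10) + r ≤ 89 := by nlinarith
    rw [pvRep_succ]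
    have key : pfLoop (x % 10 :: pvRep (x / 10) L) n r
        = ((n * (x % 10) + r) % 10
            :: (pfLoop (pvRep (x / 10) L) n ((n * (x % 10) + r) / 10)).1,
           (pfLoop (pvRep (x / 10) L) n ((n * (x % 10) + r) / 10)).2) := by
      simp only [pfLoop]
      by_cases hsm : n * (x % 10) + r < 10
      · rw [toChars_small _ hw0 hsm]
        simp only [List.length_cons, List.length_nil, if_pos]
        rw [strInt_digitChar _ (by omega), Int.toNat_of_nonneg hw0]
        have h1 : (n * (x % 10) + r) % 10 = n * (x % 10) + r := by omega
        have h2 : (n * (x % 10) + r) / 10 = 0 := by omega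
        rw [h1, h2]
      · rw [toChars_two _ (by omega) (by omega)]
        have hlen : ¬ (([Nat.digitChar ((n * (x % 10) + r).toNat / 10),
            Nat.digitChar ((n * (x % 10) + r).toNat % 10)] : List Char).length = 1) := by
          simp
        rw [if_neg hlen]
        have hdl : ([Nat.digitChar ((n * (x % 10) + r).toNat / 10),
            Nat.digitChar ((n * (x % 10) + r).toNat % 10)] : List Char).dropLast
            = [Nat.digitChar ((n * (x % 10) + r).toNat / 10)] := rfl
        have hgl : ([Nat.digitChar ((n * (x % 10) + r).toNat / 10),
            Nat.digitChar ((n * (x % 10) + r).toNat % 10)] : List Char).getLastD '0'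
            = Nat.digitChar ((n * (x % 10) + r).toNat % 10) := rfl
        rw [hdl, hgl, strInt_digitChar ((n * (x % 10) + r).toNat / 10) (by omega),
          strInt_digitChar ((n * (x % 10) + r).toNat % 10) (by omega)]
        have h1 : (((n * (x % 10) + r).toNat % 10 : Nat) : Int) = (n * (x % 10) + r) % 10 := by
          omega
        have h2 : (((n * (x % 10) + r).toNat / 10 : Nat) : Int) = (n * (x % 10) + r) / 10 := by
          omega
        rw [h1, h2]
    rw [key, ih (x / 10) n ((n * (x % 10) + r) / 10) (by omega) (by omega) hn0 hn9
      (by omega) (by omega)]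
    have hd : n * x + r = 10 * (n * (x / 10)) + (n * (x % 10) + r) := by
      have hx' : x = 10 * (x / 10) + x % 10 := by omega
      calc n * x + r = n * (10 * (x / 10) + x % 10) + r := by rw [← hx']
      _ = 10 * (n * (x / 10)) + (n * (x % 10) + r) := by ring
    have harg : n * (x / 10) + (n * (x % 10) + r) / 10 = (n * x + r) / 10 := by omega
    rw [harg]
    rw [Prod.ext_iff]
    refine ⟨?_, ?_⟩
    · show (n * (x % 10) + r) % 10 :: pvRep ((n * x + r) / 10) L = pvRep (n * x + r) (L + 1)
      rw [pvRep_succ]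
      congr 1
      omega
    · show (n * x + r) / 10 / 10 ^ L = (n * x + r) / 10 ^ (L + 1)
      rw [hpow, ← Int.ediv_ediv_eq_ediv_mul (by norm_num : (0:Int) ≤ 10)]

lemma productFast_rep (x n : Int) (L : Nat) (hx0 : 0 ≤ x) (hxL : x < 10 ^ L)
    (hn0 : 0 ≤ n) (hn9 : n ≤ 9) :
    productFast (pvRep x L) n = pvRep (n * x) (if n * x < 10 ^ L then L else L + 1) := by
  have hP : (0 : Int) < 10 ^ L := pow_pos (by norm_num) L
  unfold productFast
  rw [pfLoop_rep L x n 0 hx0 hxL hn0 hn9 (le_refl 0) (by norm_num), add_zero]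
  dsimp only
  have hnx0 : 0 ≤ n * x := by positivity
  have hR0 : 0 ≤ n * x / 10 ^ L := Int.ediv_nonneg hnx0 (le_of_lt hP)
  have hR8 : n * x / 10 ^ L ≤ 8 := by
    have h9 : n * x < 9 * 10 ^ L := by nlinarith
    have h := (Int.ediv_lt_iff_lt_mul (a := n * x) (b := 9) hP).mpr (by linarith)
    omega
  by_cases hz : n * x / 10 ^ L = 0
  · rw [hz]
    have hlt : n * x < 10 ^ L := by
      by_contra hge
      have : 1 ≤ n * x / 10 ^ L := (Int.le_ediv_iff_mul_le hP).mpr (by omega)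
      omega
    rw [show PySem.Int.toChars 0 = ['0'] from rfl,
      if_neg (by simp : ¬ ((['0'] : List Char) ≠ ['0'])), if_pos hlt]
  · have h1R : 1 ≤ n * x / 10 ^ L := by omega
    rw [toChars_small _ hR0 (by omega)]
    rw [if_pos (digitChar_ne_zero _ (by omega) (by omega))]
    have hlt : ¬ (n * x < 10 ^ L) := by
      intro hlt
      exact hz (Int.ediv_eq_zero_of_lt hnx0 hlt)
    rw [if_neg hlt]
    have hget : PySem.List.pyGetD [Nat.digitChar (n * x / 10 ^ L).toNat]
          (-1 - ((0 : Nat) : Int)) '0'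
        = Nat.digitChar (n * x / 10 ^ L).toNat := rfl
    rw [show ([Nat.digitChar (n * x / 10 ^ L).toNat] : List Char).length = 1 from rfl,
      List.range_one, List.map_cons, List.map_nil, hget,
      strInt_digitChar _ (by omega), Int.toNat_of_nonneg hR0, pvRep_append_last]
    congr 2
    omega

lemma step_core (x e S : Int) (k P Lx LE : Nat) (hLx1 : 1 ≤ Lx) (hLElo : Lx ≤ LE)
    (hLEhi : LE ≤ Lx + 1) (hx1 : 1 ≤ x) (hxhi : x < 10 ^ Lx) (he0 : 0 ≤ e) (he9 : e ≤ 9)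
    (hYhi : e * x < 10 ^ LE) (hS0 : 0 ≤ S) (hSP : S < 10 ^ P) (hPk : P ≤ k + Lx) :
    ∃ P', addL (pvRep S P) (List.replicate k (0 : Int) ++ pvRep (e * x) LE)
        = pvRep (S + 10 ^ k * (e * x)) P'
      ∧ S + 10 ^ k * (e * x) < 10 ^ P' ∧ P' ≤ (k + 1) + Lx
      ∧ ((10 : Int) ^ (LE - 1) ≤ e * x →
          (10 : Int) ^ (P' - 1) ≤ S + 10 ^ k * (e * x) ∧ 1 ≤ P') := by
  have hk0 : (0 : Int) < 10 ^ k := pow_pos (by norm_num) k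
  have hY0 : 0 ≤ e * x := mul_nonneg he0 (by linarith)
  have hM0 : 0 ≤ 10 ^ k * (e * x) := mul_nonneg (le_of_lt hk0) hY0
  have hA : (10 : Int) ^ (k + LE) = 10 ^ k * 10 ^ LE := pow_add 10 k LE
  have hMlt : 10 ^ k * (e * x) < 10 ^ (k + LE) := by
    rw [hA]; exact mul_lt_mul_of_pos_left hYhi hk0
  have hPle : (10 : Int) ^ P ≤ 10 ^ (k + LE) := pow_le_pow_right₀ (by norm_num) (by omega)
  have hB : (10 : Int) ^ (k + LE + 1) = 10 * 10 ^ (k + LE) := by ring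
  rw [pvShift (e * x) k LE, addL_rep S (10 ^ k * (e * x)) P (k + LE) hS0 hSP hM0 hMlt,
    max_eq_right (by omega : P ≤ k + LE)]
  refine ⟨_, rfl, ?_, ?_, ?_⟩
  · split_ifs with hc
    · exact hc
    · omega
  · split_ifs with hc
    · omega
    · rcases Nat.lt_or_ge LE (Lx + 1) with hl | hg
      · omega
      · exfalso
        have hLE' : LE = Lx + 1 := by omega
        have hkLx : (10 : Int) ^ P ≤ 10 ^ (k + Lx) :=
          pow_le_pow_right₀ (by norm_num) (by omega)
        have h1 : e * x ≤ 9 * x := mul_le_mul_of_nonneg_right he9 (by linarith)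
        have hY9 : e * x ≤ 9 * 10 ^ Lx - 9 := by linarith
        have hC : (10 : Int) ^ k * (9 * 10 ^ Lx - 9) = 9 * 10 ^ (k + Lx) - 9 * 10 ^ k := by
          rw [pow_add]; ring
        have hMup : 10 ^ k * (e * x) ≤ 9 * 10 ^ (k + Lx) - 9 * 10 ^ k := by
          rw [← hC]; exact mul_le_mul_of_nonneg_left hY9 (le_of_lt hk0)
        have hD : (10 : Int) ^ (k + LE) = 10 * 10 ^ (k + Lx) := by
          rw [hLE', show k + (Lx + 1) = (k + Lx) + 1 from by omega]; ring
        omega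
  · intro hYlo
    have hE : (10 : Int) ^ (k + LE - 1) = 10 ^ k * 10 ^ (LE - 1) := by
      rw [← pow_add]
      congr 1
      omega
    have hMlo : 10 ^ k * 10 ^ (LE - 1) ≤ 10 ^ k * (e * x) :=
      mul_le_mul_of_nonneg_left hYlo (le_of_lt hk0)
    constructor
    · split_ifs with hc
      · omega
      · have hh : k + LE + 1 - 1 = k + LE := by omega
        rw [hh]
        omega
    · split_ifs <;> omega

lemma step_rep (x : Int) (Lx : Nat) (hLx1 : 1 ≤ Lx) (hx1 : 1 ≤ x) (hxhi : x < 10 ^ Lx)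
    (e S : Int) (k P : Nat) (he0 : 0 ≤ e) (he9 : e ≤ 9) (hS0 : 0 ≤ S) (hSP : S < 10 ^ P)
    (hPk : P ≤ k + Lx) :
    ∃ P', addL (pvRep S P) (List.replicate k (0 : Int) ++ productFast (pvRep x Lx) e)
        = pvRep (S + 10 ^ k * (e * x)) P'
      ∧ S + 10 ^ k * (e * x) < 10 ^ P' ∧ P' ≤ (k + 1) + Lx
      ∧ (1 ≤ e → (10 : Int) ^ (Lx - 1) ≤ x →
          (10 : Int) ^ (P' - 1) ≤ S + 10 ^ k * (e * x) ∧ 1 ≤ P') := by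
  rw [productFast_rep x e Lx (by linarith) hxhi he0 he9]
  by_cases hc : e * x < 10 ^ Lx
  · rw [if_pos hc]
    obtain ⟨P', h1, h2, h3, h4⟩ := step_core x e S k P Lx Lx hLx1 (le_refl _) (by omega)
      hx1 hxhi he0 he9 hc hS0 hSP hPk
    refine ⟨P', h1, h2, h3, fun he1 hxlo => h4 ?_⟩
    calc (10 : Int) ^ (Lx - 1) ≤ x := hxlo
    _ = 1 * x := (one_mul x).symm
    _ ≤ e * x := mul_le_mul_of_nonneg_right he1 (by linarith)
  · rw [if_neg hc]
    have h1e : e * x ≤ 9 * x := mul_le_mul_of_nonneg_right he9 (by linarith)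
    have hYhi : e * x < 10 ^ (Lx + 1) := by
      have hub : e * x < 10 * 10 ^ Lx := by nlinarith
      calc e * x < 10 * 10 ^ Lx := hub
      _ = 10 ^ (Lx + 1) := by ring
    obtain ⟨P', h1, h2, h3, h4⟩ := step_core x e S k P Lx (Lx + 1) hLx1 (by omega) (le_refl _)
      hx1 hxhi he0 he9 hYhi hS0 hSP hPk
    refine ⟨P', h1, h2, h3, fun he1 hxlo => h4 ?_⟩
    have hh : Lx + 1 - 1 = Lx := by omega
    rw [hh]
    omega

lemma pvVal_cons (d : Int) (l : List Int) : pvVal (d :: l) = d + 10 * pvVal l := rfl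

lemma prodLoop_rep (x : Int) (Lx : Nat) (hLx1 : 1 ≤ Lx) (hx1 : 1 ≤ x)
    (hxlo : (10 : Int) ^ (Lx - 1) ≤ x) (hxhi : x < 10 ^ Lx) :
    ∀ (l2 : List Int), l2 ≠ [] → (∀ d ∈ l2, 0 ≤ d ∧ d ≤ 9) →
      (∀ d, l2.getLast? = some d → 1 ≤ d) →
    ∀ (k : Nat) (S : Int) (P : Nat), 0 ≤ S → S < 10 ^ P → P ≤ k + Lx →
    prodLoop (pvRep x Lx) l2 k (pvRep S P) = pvCan (S + 10 ^ k * pvVal l2 * x) := by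
  intro l2
  induction l2 with
  | nil => intro h; exact absurd rfl h
  | cons e rest ih =>
    intro _ hdig hlast k S P hS0 hSP hPk
    have he : 0 ≤ e ∧ e ≤ 9 := hdig e (by simp)
    obtain ⟨P', heq, hlt, hle, hcanon⟩ :=
      step_rep x Lx hLx1 hx1 hxhi e S k P he.1 he.2 hS0 hSP hPk
    have hk0 : (0 : Int) < 10 ^ k := pow_pos (by norm_num) k
    have hS'0 : (0 : Int) ≤ S + 10 ^ k * (e * x) :=
      add_nonneg hS0 (mul_nonneg (le_of_lt hk0) (mul_nonneg he.1 (by linarith)))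
    cases rest with
    | nil =>
      rw [show prodLoop (pvRep x Lx) [e] k (pvRep S P)
          = addL (pvRep S P) (List.replicate k (0 : Int) ++ productFast (pvRep x Lx) e)
        from rfl, heq]
      have he1 : 1 ≤ e := hlast e (by simp)
      obtain ⟨hlo', hP1⟩ := hcanon he1 hxlo
      have hv : pvVal [e] = e := by simp [pvVal]
      rw [hv]
      have harg : S + 10 ^ k * e * x = S + 10 ^ k * (e * x) := by ring
      rw [harg, pvCan_eq _ hS'0, pvD_eq _ P' hP1 hlo' hlt]
    | cons r0 rs =>
      rw [show prodLoop (pvRep x Lx) (e :: r0 :: rs) k (pvRep S P)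
          = prodLoop (pvRep x Lx) (r0 :: rs) (k + 1)
              (addL (pvRep S P) (List.replicate k (0 : Int) ++ productFast (pvRep x Lx) e))
        from rfl, heq]
      have hrne : (r0 :: rs : List Int) ≠ [] := by simp
      have hlast' : ∀ d, (r0 :: rs).getLast? = some d → 1 ≤ d := by
        intro d hd
        apply hlast
        rwa [List.getLast?_cons_cons]
      rw [ih hrne (fun d hd => hdig d (by simp [hd])) hlast' (k + 1)
        (S + 10 ^ k * (e * x)) P' hS'0 hlt hle]
      congr 1
      simp only [pvVal_cons]
      ring

lemma productL_rep (x : Int) (Lx : Nat) (hLx1 : 1 ≤ Lx) (hx1 : 1 ≤ x)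
    (hxlo : (10 : Int) ^ (Lx - 1) ≤ x) (hxhi : x < 10 ^ Lx) (l2 : List Int) (hne : l2 ≠ [])
    (hd : ∀ d ∈ l2, 0 ≤ d ∧ d ≤ 9) (hlast : ∀ d, l2.getLast? = some d → 1 ≤ d) :
    productL (pvRep x Lx) l2 = pvCan (pvVal l2 * x) := by
  unfold productL
  have h0 : ([] : List Int) = pvRep 0 0 := rfl
  rw [h0, prodLoop_rep x Lx hLx1 hx1 hxlo hxhi l2 hne hd hlast 0 0 0 (le_refl 0)
    (by norm_num) (by omega)]
  norm_num

lemma can_facts (a : Int) (ha : 1 ≤ a) :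
    pvCan a ≠ [] ∧ (∀ d ∈ pvCan a, 0 ≤ d ∧ d ≤ 9)
      ∧ (∀ d, (pvCan a).getLast? = some d → 1 ≤ d) ∧ pvVal (pvCan a) = a := by
  have hm : a.toNat ≠ 0 := by omega
  have hdig : Nat.digits 10 a.toNat ≠ [] := Nat.digits_ne_nil_iff_ne_zero.mpr hm
  refine ⟨?_, ?_, ?_, ?_⟩
  · unfold pvCan
    simpa using hdig
  · intro d hd
    unfold pvCan at hd
    obtain ⟨d0, hd0, rfl⟩ := List.mem_map.mp hd
    have := Nat.digits_lt_base (by norm_num) hd0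
    omega
  · intro d hd
    unfold pvCan at hd
    rw [List.getLast?_map, List.getLast?_eq_getLast hdig] at hd
    simp only [Option.map_some, Option.some.injEq] at hd
    have hnz : (Nat.digits 10 a.toNat).getLast hdig ≠ 0 := Nat.getLast_digit_ne_zero 10 hm
    have hnz' : 1 ≤ (Nat.digits 10 a.toNat).getLast hdig := Nat.one_le_iff_ne_zero.mpr hnz
    omega
  · unfold pvCan
    rw [pvVal_can, Int.toNat_of_nonneg (by omega)]

lemma pyRange_nil (m : Int) : PySem.List.pyRange m m 1 = [] := by
  have h := PySem.List.pyRange_one_append m m m (le_refl m) (le_refl m)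
  have hlen := congrArg List.length h
  rw [List.length_append] at hlen
  have hz : (PySem.List.pyRange m m 1).length = 0 := by omega
  exact List.eq_nil_of_length_eq_zero hz

lemma pyRange_snoc (n : Nat) : PySem.List.pyRange 0 ((n : Int) + 1) 1
    = PySem.List.pyRange 0 (n : Int) 1 ++ [(n : Int)] := by
  rw [PySem.List.pyRange_one_append 0 (n : Int) ((n : Int) + 1) (by positivity) (by omega)]
  congr 1
  rw [PySem.List.pyRange_one_cons (by omega), pyRange_nil]

lemma power2_loop (a : Int) (ha : 1 ≤ a) : ∀ n : Nat,
    (PySem.List.pyRange 0 (n : Int) 1).foldl (fun l1 _ => productL l1 (pvCan a)) [1]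
      = pvCan (a ^ n) := by
  intro n
  induction n with
  | zero =>
    rw [Nat.cast_zero, pyRange_nil]
    simp only [List.foldl_nil, pow_zero]
    decide
  | succ n ih =>
    rw [Nat.cast_add, Nat.cast_one, pyRange_snoc, List.foldl_append, ih]
    simp only [List.foldl_cons, List.foldl_nil]
    have hx1 : (1 : Int) ≤ a ^ n := one_le_pow₀ ha
    obtain ⟨hD1, hDlo, hDhi⟩ := pvD_spec (a ^ n) hx1
    obtain ⟨hne, hd, hlast, hval⟩ := can_facts a ha
    rw [pvCan_eq (a ^ n) (by positivity),
      productL_rep (a ^ n) (pvD (a ^ n)) hD1 hx1 hDlo hDhi (pvCan a) hne hd hlast, hval]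
    congr 1
    ring

lemma zero_loop : ∀ n : Nat,
    (PySem.List.pyRange 0 ((n : Nat) : Int) 1).foldl
        (fun l1 _ => productL l1 (((PySem.Int.toChars 0).map chInt).reverse)) [1]
      = if n = 0 then [1] else [0] := by
  have hl2 : ((PySem.Int.toChars 0).map chInt).reverse = [0] := by decide
  intro n
  induction n with
  | zero => rw [Nat.cast_zero, pyRange_nil]; simp
  | succ n ih =>
    rw [Nat.cast_add, Nat.cast_one, pyRange_snoc, List.foldl_append, ih]
    simp only [List.foldl_cons, List.foldl_nil, hl2]
    by_cases h : n = 0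
    · rw [if_pos h, if_neg (by omega)]
      decide
    · rw [if_neg h, if_neg (by omega)]
      decide

lemma power2_eq (a b : Int) (ha : 0 ≤ a) (hb : 0 ≤ b) :
    power2 a b = pvCanZ (a ^ b.toNat) := by
  unfold power2
  have hpr : PySem.List.pyRange 0 b 1 = PySem.List.pyRange 0 ((b.toNat : Nat) : Int) 1 := by
    rw [Int.toNat_of_nonneg hb]
  rcases eq_or_lt_of_le ha with h0 | hpos
  · have ha0 : a = 0 := h0.symm
    subst ha0
    rw [hpr, zero_loop b.toNat]
    unfold pvCanZ
    by_cases hbz : b.toNat = 0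
    · rw [if_pos hbz, hbz, pow_zero]
      norm_num
      decide
    · rw [if_neg hbz, zero_pow hbz]
      simp
  · have hm : a.toNat ≠ 0 := by omega
    have hl2 : ((PySem.Int.toChars a).map chInt).reverse = pvCan a := by
      rw [show a = ((a.toNat : Nat) : Int) from (Int.toNat_of_nonneg ha).symm,
        map_chInt_toChars]
      unfold pvCanZ
      rw [Int.toNat_natCast, if_neg hm]
    rw [hl2, hpr, power2_loop a hpos b.toNat]
    unfold pvCanZ
    have h1 : (1 : Int) ≤ a ^ b.toNat := one_le_pow₀ hpos
    rw [if_neg (by omega)]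

lemma power2_alt_eq (a b : Int) (ha : 0 ≤ a) :
    power2_alt a b = pvCanZ (a ^ b.toNat) := by
  unfold power2_alt
  have h0 : 0 ≤ a ^ b.toNat := by positivity
  rw [show a ^ b.toNat = (((a ^ b.toNat).toNat : Nat) : Int) from (Int.toNat_of_nonneg h0).symm,
    map_chInt_toChars]

-- ===== VERDICT (by name: the statement is the Claim_ definition above) =====
theorem power2_spec : Claim_equal_power2 := by
  intro a b _hdom hpre
  unfold Spec_power2
  rw [power2_eq a b hpre.1 hpre.2, power2_alt_eq a b hpre.1]
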